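-- pv_equiv track=rewrite | github.com/rafael-agra/Exercicio-de-Programacao-2-Python | ep02.py | polinomioComRaiz
-- ===== SOURCE A (Python) =====
-- def polinomioComRaiz(p, b) :
--     """Devolve True se b é raiz do polinômio representado pela lista p,
--        ou False no caso contrário.
--
--        p -- a lista dos coeficientes do polinômio
--        b -- o número a ser testado como raiz
--     """
--
--     # Escreva aqui o corpo da função
--     a = len(p)
--     valor = 0
--     for i in range (a):
--         valor += p[i]*(b**i)
--         a += 1
--
--     teste = ""
--     if valor == 0:
--         teste = True
--     else:
--         teste = False
--     return teste  # Ajuste o valor de retorno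
-- ===== SOURCE B (Python) =====
-- def polinomioComRaiz(p, b):
--     """Horner's method: evaluate in one pass, O(len(p)) multiplications."""
--     valor = 0
--     for c in reversed(p):
--         valor = valor * b + c
--     return valor == 0
-- ===== Notes on version B (the rewrite author's own statement) =====
-- stated objective: faster
-- what changed: Replaces the per-index evaluation with b**i (recomputing each power from scratch) by Horner's method, a single reverse pass maintaining one accumulator.
import Mathlib
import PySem

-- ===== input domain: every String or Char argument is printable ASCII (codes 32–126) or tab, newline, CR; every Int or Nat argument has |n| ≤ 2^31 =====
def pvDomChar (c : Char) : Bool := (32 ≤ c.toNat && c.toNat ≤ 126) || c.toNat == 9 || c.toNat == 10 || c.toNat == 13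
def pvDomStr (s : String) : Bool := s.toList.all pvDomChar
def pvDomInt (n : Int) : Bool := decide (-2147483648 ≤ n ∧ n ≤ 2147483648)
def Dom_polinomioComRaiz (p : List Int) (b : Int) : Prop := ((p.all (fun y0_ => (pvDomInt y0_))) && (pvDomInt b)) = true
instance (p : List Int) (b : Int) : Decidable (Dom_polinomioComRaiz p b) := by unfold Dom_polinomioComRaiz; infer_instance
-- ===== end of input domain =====

-- B replaces A's per-index b**i evaluation by Horner's method (one reverse pass); return value only.

-- ===== PORT A =====
-- literal port: state is (a, valor); 'a += 1' in the loop body is dead (range was fixed at entry) but kept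
def polinomioComRaiz (p : List Int) (b : Int) : Bool :=
  let a : Int := (p.length : Int)
  let st :=
    (PySem.List.pyRange 0 a 1).foldl
      (fun (st : Int × Int) i => (st.1 + 1, st.2 + PySem.List.pyGetD p i 0 * b ^ i.toNat))
      (a, 0)
  let valor := st.2
  if valor == 0 then true else false

-- ===== PORT B =====
def polinomioComRaiz_alt (p : List Int) (b : Int) : Bool :=
  decide ((p.reverse.foldl (fun acc c => acc * b + c) 0) = 0)

-- ===== PRECONDITION & SPEC =====
def Spec_polinomioComRaiz (p : List Int) (b : Int) (out : Bool) : Prop := out = polinomioComRaiz_alt p b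
instance (p : List Int) (b : Int) (out : Bool) : Decidable (Spec_polinomioComRaiz p b out) := by unfold Spec_polinomioComRaiz; infer_instance

-- ===== CLAIM =====
def Claim_equal_polinomioComRaiz : Prop := ∀ (p : List Int) (b : Int), Dom_polinomioComRaiz p b → Spec_polinomioComRaiz p b (polinomioComRaiz p b)

-- ===== LEMMAS AND PROOFS =====

-- the first state component is dead weight: the second folds on its own
theorem pv_snd_foldl {α : Type} (l : List α) (g : α → Int) (a v : Int) :
    (l.foldl (fun (st : Int × Int) i => (st.1 + 1, st.2 + g i)) (a, v)).2
      = v + (l.map g).sum := by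
  induction l generalizing a v with
  | nil => simp
  | cons x xs ih => simp [List.foldl_cons, ih, add_assoc]

-- A's sum of p[i] * b^i equals Horner's foldr form
theorem pv_sum_eq_horner (p : List Int) (b : Int) :
    ((List.range p.length).map (fun k => p.getD k 0 * b ^ k)).sum
      = p.foldr (fun c acc => acc * b + c) 0 := by
  induction p with
  | nil => simp
  | cons c q ih =>
    rw [List.length_cons, List.range_succ_eq_map]
    simp only [List.map_cons, List.map_map, List.sum_cons]
    have h1 : (List.map ((fun k => (c :: q).getD k 0 * b ^ k) ∘ Nat.succ) (List.range q.length)).sum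
        = (List.map (fun k => b * (q.getD k 0 * b ^ k)) (List.range q.length)).sum := by
      congr 1
      apply List.map_congr_left
      intro k _
      simp [Function.comp, pow_succ]
      ring
    rw [h1, List.sum_map_mul_left, ih, List.foldr_cons]
    simp only [List.getD_cons_zero]
    ring

theorem pv_valor_eq (p : List Int) (b : Int) :
    ((PySem.List.pyRange 0 (p.length : Int) 1).foldl
      (fun (st : Int × Int) i => (st.1 + 1, st.2 + PySem.List.pyGetD p i 0 * b ^ i.toNat))
      ((p.length : Int), 0)).2
      = p.reverse.foldl (fun acc c => acc * b + c) 0 := by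
  rw [List.foldl_reverse, PySem.List.pyRange_one, pv_snd_foldl, List.map_map]
  have h : List.map ((fun i => PySem.List.pyGetD p i 0 * b ^ i.toNat) ∘ fun k : Nat => (0 : Int) + ↑k)
        (List.range (((p.length : Int) - 0).toNat))
      = List.map (fun k => p.getD k 0 * b ^ k) (List.range p.length) := by
    simp only [sub_zero, Int.toNat_natCast]
    apply List.map_congr_left
    intro k _
    simp [Function.comp, PySem.List.pyGetD_natCast]
  rw [h, pv_sum_eq_horner]
  simp

-- ===== VERDICT =====
theorem polinomioComRaiz_spec : Claim_equal_polinomioComRaiz := by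
  intro p b _
  unfold Spec_polinomioComRaiz polinomioComRaiz polinomioComRaiz_alt
  simp only [pv_valor_eq]
  by_cases h : p.reverse.foldl (fun acc c => acc * b + c) 0 = 0 <;> simp [h]
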